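-- pv_equiv track=rewrite | github.com/AmirMMoghaddam/BachelorProject | Pyrhon Codes/QKD.py | map_bits_to_numbers
-- ===== SOURCE A (Python) =====
-- def map_bits_to_numbers(bit_list):
--     # Work on a copy of the input list to avoid modifying the original list
--     modified_bit_list = bit_list.copy()
--     # Ensure the list length is even by appending a 0 if necessary
--     if len(modified_bit_list) % 2 != 0:
--         modified_bit_list.append(0)
--
--     # Map pairs of bits to numbers
--     number_list = []
--     for i in range(0, len(modified_bit_list), 2):
--         pair = modified_bit_list[i:i+2]
--         number = pair[0] * 2 + pair[1]
--         number_list.append(number)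
--     return number_list # Return the original length as well
-- ===== SOURCE B (Python) =====
-- def map_bits_to_numbers(bit_list):
--     # Single stateful pass: carry a pending high bit instead of slicing pairs.
--     number_list = []
--     pending = None
--     for b in bit_list:
--         if pending is None:
--             pending = b
--         else:
--             number_list.append(pending * 2 + b)
--             pending = None
--     if pending is not None:
--         number_list.append(pending * 2)
--     return number_list
-- ===== Notes on version B (the rewrite author's own statement) =====
-- stated objective: simpler
-- what changed: Replaces the copy-then-pad-then-index-by-range-and-slice loop with one direct pass over the elements carrying a pending high bit (emitting pending*2 at the end for odd length).
import Mathlib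
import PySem

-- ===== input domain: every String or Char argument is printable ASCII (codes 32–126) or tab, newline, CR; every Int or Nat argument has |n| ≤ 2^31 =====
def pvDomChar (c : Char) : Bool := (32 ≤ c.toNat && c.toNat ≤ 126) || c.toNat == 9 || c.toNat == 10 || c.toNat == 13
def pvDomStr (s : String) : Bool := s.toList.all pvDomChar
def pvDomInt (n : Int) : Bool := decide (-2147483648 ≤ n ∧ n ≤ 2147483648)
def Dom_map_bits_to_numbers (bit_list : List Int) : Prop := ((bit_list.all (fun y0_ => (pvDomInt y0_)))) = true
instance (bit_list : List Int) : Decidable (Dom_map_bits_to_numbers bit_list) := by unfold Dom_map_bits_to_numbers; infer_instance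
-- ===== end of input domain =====

-- B replaces A's copy/pad/slice-by-pairs loop with one direct pass carrying a pending high bit (simpler decomposition, same O(n) cost).


-- ===== PORT A =====
-- literal transliteration: copy, pad with 0 if odd length, then for i in range(0, len, 2)
-- take the slice pair = m[i:i+2] and append pair[0]*2 + pair[1].
-- pair[0]/pair[1] are ported as pyGet? with default 0; they are always in range
-- since the padded list has even length, so the default is never used.
def map_bits_to_numbers (bit_list : List Int) : List Int :=
  let modified_bit_list :=
    if bit_list.length % 2 ≠ 0 then bit_list ++ [0] else bit_list
  (PySem.List.pyRange 0 (modified_bit_list.length) 2).foldl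
    (fun number_list i =>
      let pair := PySem.List.slice modified_bit_list (some i) (some (i + 2))
      number_list ++ [((PySem.List.pyGet? pair 0).getD 0) * 2 + ((PySem.List.pyGet? pair 1).getD 0)])
    []

-- ===== PORT B =====
-- one pass with a pending high bit
def pvBStep (st : List Int × Option Int) (b : Int) : List Int × Option Int :=
  match st.2 with
  | none => (st.1, some b)
  | some p => (st.1 ++ [p * 2 + b], none)

def map_bits_to_numbers_alt (bit_list : List Int) : List Int :=
  let st := bit_list.foldl pvBStep ([], none)
  match st.2 with
  | none => st.1
  | some p => st.1 ++ [p * 2]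

-- ===== PRECONDITION & SPEC =====
def Spec_map_bits_to_numbers (bit_list : List Int) (out : List Int) : Prop := out = map_bits_to_numbers_alt bit_list
instance (bit_list : List Int) (out : List Int) : Decidable (Spec_map_bits_to_numbers bit_list out) := by unfold Spec_map_bits_to_numbers; infer_instance

-- ===== CLAIM (what is proved, stated in full; the proofs are below) =====
def Claim_equal_map_bits_to_numbers : Prop := ∀ (bit_list : List Int), Dom_map_bits_to_numbers bit_list → Spec_map_bits_to_numbers bit_list (map_bits_to_numbers bit_list)

-- ===== LEMMAS AND PROOFS =====

-- the common pairwise value both programs compute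
def pvPairs : List Int → List Int
  | [] => []
  | [a] => [a * 2]
  | a :: b :: t => (a * 2 + b) :: pvPairs t

theorem pvB_aux (l : List Int) : ∀ (acc : List Int),
    (match (l.foldl pvBStep (acc, none)) with
     | (r, none) => r
     | (r, some p) => r ++ [p * 2]) = acc ++ pvPairs l := by
  induction l using pvPairs.induct with
  | case1 => intro acc; simp [pvPairs]
  | case2 a => intro acc; simp [pvPairs, pvBStep]
  | case3 a b t ih =>
      intro acc
      simp only [List.foldl_cons, pvBStep]
      simpa [pvPairs, List.append_assoc] using ih (acc ++ [a * 2 + b])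

theorem pvB_eq_pairs (l : List Int) : map_bits_to_numbers_alt l = pvPairs l := by
  have h := pvB_aux l []
  unfold map_bits_to_numbers_alt
  rcases hf : List.foldl pvBStep ([], none) l with ⟨r, p⟩
  rw [hf] at h
  cases p <;> simpa using h

-- A's body on the padded (even-length) list computes pvPairs
theorem pvA_core (m : List Int) (h : m.length % 2 = 0) :
    (List.range (m.length / 2)).map
      (fun k =>
        let pair := List.take 2 (List.drop (2 * k) m)
        ((PySem.List.pyGet? pair 0).getD 0) * 2 + ((PySem.List.pyGet? pair 1).getD 0)) = pvPairs m := by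
  induction m using pvPairs.induct with
  | case1 => simp [pvPairs]
  | case2 a => simp at h
  | case3 a b t ih =>
      have hlen : (a :: b :: t).length / 2 = t.length / 2 + 1 := by
        simp [List.length_cons]; omega
      rw [hlen, List.range_succ_eq_map]
      simp only [List.map_cons, List.map_map, pvPairs]
      refine congrArg₂ List.cons ?_ ?_
      · simp [PySem.List.pyGet?, PySem.List.pyIdx?]
      · have ht : t.length % 2 = 0 := by simp [List.length_cons] at h; omega
        rw [← ih ht]
        apply List.map_congr_left
        intro k _
        have h2 : 2 * Nat.succ k = (2 * k) + 2 := by omega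
        simp [Function.comp, h2, List.drop_succ_cons]

-- padding an odd-length list with 0 does not change pvPairs:
-- the final singleton pair [a] contributes a*2 either way
theorem pvPairs_append_zero (l : List Int) (h : l.length % 2 = 1) :
    pvPairs (l ++ [0]) = pvPairs l := by
  induction l using pvPairs.induct with
  | case1 => simp at h
  | case2 a => simp [pvPairs]
  | case3 a b t ih =>
      have ht : t.length % 2 = 1 := by simp [List.length_cons] at h; omega
      simp [pvPairs, ih ht]

theorem pvA_eq_pairs (l : List Int) : map_bits_to_numbers l = pvPairs l := by
  unfold map_bits_to_numbers
  set m := if l.length % 2 ≠ 0 then l ++ [0] else l with hm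
  have hme : m.length % 2 = 0 := by
    by_cases hc : l.length % 2 ≠ 0 <;> simp [hm, hc] <;> omega
  have hpm : pvPairs m = pvPairs l := by
    by_cases hc : l.length % 2 ≠ 0
    · simp only [hm, if_pos hc]
      exact pvPairs_append_zero l (by omega)
    · simp [hm, hc]
  rw [PySem.List.foldl_append_singleton_eq_map]
  rw [PySem.List.pyRange_of_pos 0 (m.length) (by norm_num)]
  rw [List.map_map]
  rcases Nat.eq_zero_or_pos m.length with h0 | hpos
  · have : m = [] := List.eq_nil_of_length_eq_zero h0
    simp [this, ← hpm, pvPairs]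
  · have hlt : (0 : Int) < (m.length : Int) := by exact_mod_cast hpos
    rw [if_pos hlt]
    have hcnt : (((m.length : Int) - 0 + 2 - 1) / 2).toNat = m.length / 2 := by
      omega
    rw [hcnt, ← hpm, ← pvA_core m hme]
    apply List.map_congr_left
    intro k _
    have h1 : (0 + 2 * (k : Int)) = ((2 * k : Nat) : Int) := by push_cast; ring
    have hs := PySem.List.slice_natCast_add m (2 * k) 2
    simp only [Nat.cast_ofNat] at hs
    simp only [Function.comp, h1, hs]

-- ===== VERDICT (by name: the statement is the Claim_ definition above) =====
theorem map_bits_to_numbers_spec : Claim_equal_map_bits_to_numbers := by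
  intro l _
  unfold Spec_map_bits_to_numbers
  rw [pvA_eq_pairs, pvB_eq_pairs]
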